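-- pv_equiv track=rewrite | github.com/hans-blok/mandarin-agents | artefacten/fnd/fnd.01.ecosysteem-coordinator/runner/ecosysteem-coordinator.runner.py | strip_jsonc_comments
-- ===== SOURCE A (Python) =====
-- from typing import Any, Dict, List, Tuple, Optional, Set, TextIO
--
-- def strip_jsonc_comments(content: str) -> str:
--     """Verwijder JSONC-commentaar, string-aware (slaat string-literals over)."""
--     result: List[str] = []
--     i, n = 0, len(content)
--     in_string = False
--     while i < n:
--         c = content[i]
--         if in_string:
--             if c == "\\" and i + 1 < n:
--                 result.append(c)
--                 result.append(content[i + 1])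
--                 i += 2
--                 continue
--             if c == '"':
--                 in_string = False
--             result.append(c)
--             i += 1
--         else:
--             if c == '"':
--                 in_string = True
--                 result.append(c)
--                 i += 1
--             elif c == "/" and i + 1 < n and content[i + 1] == "/":
--                 while i < n and content[i] != "\n":
--                     i += 1
--             elif c == "/" and i + 1 < n and content[i + 1] == "*":
--                 i += 2
--                 while i < n - 1 and not (content[i] == "*" and content[i + 1] == "/"):
--                     i += 1
--                 i += 2
--             else:
--                 result.append(c)
--                 i += 1
--     return "".join(result)
-- ===== SOURCE B (Python) =====
-- def strip_jsonc_comments(content: str) -> str: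
--     """Flat finite-state machine: one pass, one state variable, no index arithmetic."""
--     NORMAL, IN_STRING, ESCAPED, SLASH, LINE, BLOCK, STAR = range(7)
--     out = []
--     state = NORMAL
--     for c in content:
--         if state == NORMAL:
--             if c == '"':
--                 out.append(c)
--                 state = IN_STRING
--             elif c == '/':
--                 state = SLASH
--             else:
--                 out.append(c)
--         elif state == IN_STRING:
--             if c == '\\':
--                 out.append(c)
--                 state = ESCAPED
--             else:
--                 out.append(c)
--                 if c == '"':
--                     state = NORMAL
--         elif state == ESCAPED:
--             out.append(c)
--             state = IN_STRING
--         elif state == SLASH: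
--             if c == '/':
--                 state = LINE
--             elif c == '*':
--                 state = BLOCK
--             else:
--                 out.append('/')
--                 out.append(c)
--                 state = IN_STRING if c == '"' else NORMAL
--         elif state == LINE:
--             if c == '\n':
--                 out.append(c)
--                 state = NORMAL
--         elif state == BLOCK:
--             if c == '*':
--                 state = STAR
--         else:  # STAR
--             if c == '/':
--                 state = NORMAL
--             elif c != '*':
--                 state = BLOCK
--     if state == SLASH:
--         out.append('/')
--     return ''.join(out)
-- ===== Notes on version B (the rewrite author's own statement) =====
-- stated objective: simpler
-- what changed: Replaces A's index-based while loop with i/i+1 lookahead guards and two nested skip-loops by a flat single-pass finite state machine (NORMAL/IN_STRING/ESCAPED/SAW_SLASH/LINE_COMMENT/BLOCK_COMMENT/STAR) over the characters with one state variable and no index arithmetic.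
import Mathlib
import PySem

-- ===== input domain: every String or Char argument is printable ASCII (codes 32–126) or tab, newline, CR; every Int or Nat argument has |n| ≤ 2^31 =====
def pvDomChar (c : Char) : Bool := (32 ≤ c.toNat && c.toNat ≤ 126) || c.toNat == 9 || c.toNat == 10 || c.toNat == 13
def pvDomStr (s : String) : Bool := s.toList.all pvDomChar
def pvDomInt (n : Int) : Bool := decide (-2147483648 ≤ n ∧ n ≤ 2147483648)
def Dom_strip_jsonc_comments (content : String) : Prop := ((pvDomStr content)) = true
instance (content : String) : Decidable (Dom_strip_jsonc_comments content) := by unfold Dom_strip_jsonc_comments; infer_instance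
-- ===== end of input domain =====

-- B replaces A's index-juggling loop with nested skip-loops by a flat one-state-variable
-- finite state machine over the characters (objective: simpler, same single-pass cost).

-- ===== PORT A =====
-- inner 'while i < n and content[i] != "\n"' of the line-comment branch
def skipLine : List Char → List Char
  | [] => []
  | c :: cs => if c ≠ '\n' then skipLine cs else c :: cs

theorem skipLine_length_le (xs : List Char) : (skipLine xs).length ≤ xs.length := by
  induction xs with
  | nil => simp [skipLine]
  | cons c cs ih =>
    simp only [skipLine]
    split
    · simpa using Nat.le_succ_of_le ih
    · simp

mutual
-- the outer while loop; second argument is in_string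
def goA : List Char → Bool → List Char
  | [], _ => []
  | '\\' :: d :: ds, true => '\\' :: d :: goA ds true        -- c == "\\" and i+1 < n
  | c :: cs, true => if c = '"' then c :: goA cs false else c :: goA cs true
  | c :: cs, false =>
      if c = '"' then c :: goA cs true
      else
        match cs with
        | d :: ds =>
            if c = '/' ∧ d = '/' then goA (skipLine (d :: ds)) false  -- skip starts at the first '/', itself ≠ '\n'
            else if c = '/' ∧ d = '*' then goB ds
            else c :: goA (d :: ds) false
        | [] => c :: goA [] false
termination_by xs _ => xs.length
decreasing_by
  all_goals simp_wf <;> try omega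
  all_goals have := skipLine_length_le (d :: ds); simp at this ⊢; omega
-- the inner 'while i < n - 1 and not (content[i] == "*" and content[i+1] == "/")' plus 'i += 2'
def goB : List Char → List Char
  | a :: b :: rest => if a = '*' ∧ b = '/' then goA rest false else goB (b :: rest)
  | _ => []
termination_by xs => xs.length
end

def strip_jsonc_comments (content : String) : String := String.ofList (goA content.toList false)

-- ===== PORT B =====
inductive FsmSt | norm | instr | esc | slash | line | block | star
deriving DecidableEq, Repr

def fsmB : List Char → FsmSt → List Char
  | [], s => if s = .slash then ['/'] else []          -- pending deferred '/'
  | c :: cs, .norm =>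
      if c = '"' then c :: fsmB cs .instr
      else if c = '/' then fsmB cs .slash
      else c :: fsmB cs .norm
  | c :: cs, .instr =>
      if c = '\\' then c :: fsmB cs .esc
      else if c = '"' then c :: fsmB cs .norm
      else c :: fsmB cs .instr
  | c :: cs, .esc => c :: fsmB cs .instr
  | c :: cs, .slash =>
      if c = '/' then fsmB cs .line
      else if c = '*' then fsmB cs .block
      else if c = '"' then '/' :: c :: fsmB cs .instr
      else '/' :: c :: fsmB cs .norm
  | c :: cs, .line => if c = '\n' then c :: fsmB cs .norm else fsmB cs .line
  | c :: cs, .block => if c = '*' then fsmB cs .star else fsmB cs .block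
  | c :: cs, .star =>
      if c = '/' then fsmB cs .norm
      else if c = '*' then fsmB cs .star
      else fsmB cs .block

def strip_jsonc_comments_alt (content : String) : String := String.ofList (fsmB content.toList .norm)

-- ===== PRECONDITION & SPEC =====
def Spec_strip_jsonc_comments (content : String) (out : String) : Prop := out = strip_jsonc_comments_alt content
instance (content : String) (out : String) : Decidable (Spec_strip_jsonc_comments content out) := by unfold Spec_strip_jsonc_comments; infer_instance

-- ===== CLAIM (what is proved, stated in full; the proofs are below) =====
def Claim_equal_strip_jsonc_comments : Prop := ∀ (content : String), Dom_strip_jsonc_comments content → Spec_strip_jsonc_comments content (strip_jsonc_comments content)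

-- ===== LEMMAS AND PROOFS =====

-- unfolding equations for the (well-founded) A-side recursion
theorem goA_nil (b : Bool) : goA [] b = [] := by cases b <;> rw [goA.eq_def]

theorem goA_true_esc (d : Char) (ds : List Char) : goA ('\\'::d::ds) true = '\\'::d::goA ds true := by
  simp [goA]

theorem goA_true_esc1 : goA ['\\'] true = ['\\'] := by rw [goA.eq_def]; simp [goA_nil]

theorem goA_true (c : Char) (cs : List Char) (h : c ≠ '\\') :
    goA (c::cs) true = if c = '"' then c::goA cs false else c::goA cs true := by
  rw [goA.eq_def]; cases cs <;> simp [h]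

theorem goA_false_quote (cs : List Char) : goA ('"'::cs) false = '"'::goA cs true := by
  rw [goA.eq_def]; simp

theorem goA_false_lc (cs : List Char) : goA ('/'::'/'::cs) false = goA (skipLine ('/'::cs)) false := by
  rw [goA.eq_def]; simp

theorem goA_false_bc (ds : List Char) : goA ('/'::'*'::ds) false = goB ds := by
  rw [goA.eq_def]; simp

theorem goA_false_one (c : Char) (h : c ≠ '"') : goA [c] false = [c] := by
  rw [goA.eq_def]; simp [h, goA_nil]

theorem goA_false_other (c d : Char) (cs : List Char) (h : c ≠ '"')
    (h2 : ¬(c = '/' ∧ d = '/')) (h3 : ¬(c = '/' ∧ d = '*')) :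
    goA (c::d::cs) false = c :: goA (d::cs) false := by
  rw [goA.eq_def]; simp [h, h2, h3]

theorem goB_nil : goB [] = [] := by rw [goB.eq_def]

theorem goB_one (a : Char) : goB [a] = [] := by rw [goB.eq_def]

theorem goB_two (a b : Char) (rest : List Char) :
    goB (a::b::rest) = if a = '*' ∧ b = '/' then goA rest false else goB (b::rest) := by
  rw [goB]

theorem fsm_goA_nil :
    (fsmB [] .norm = goA [] false) ∧ (fsmB [] .instr = goA [] true) ∧
    (fsmB [] .slash = goA ('/' :: []) false) ∧
    (fsmB [] .line = goA (skipLine []) false) ∧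
    (fsmB [] .block = goB []) ∧ (fsmB [] .star = goB ('*' :: [])) := by
  refine ⟨by simp [fsmB, goA_nil], by simp [fsmB, goA_nil], ?_, by simp [fsmB, skipLine, goA_nil],
    by simp [fsmB, goB_nil], by simp [fsmB, goB_one]⟩
  simp [fsmB, goA_false_one '/' (by decide)]

theorem fsm_eq_goA : ∀ (n : Nat) (xs : List Char), xs.length ≤ n →
    (fsmB xs .norm = goA xs false) ∧ (fsmB xs .instr = goA xs true) ∧
    (fsmB xs .slash = goA ('/' :: xs) false) ∧
    (fsmB xs .line = goA (skipLine xs) false) ∧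
    (fsmB xs .block = goB xs) ∧ (fsmB xs .star = goB ('*' :: xs)) := by
  intro n
  induction n with
  | zero =>
    intro xs h
    have hx : xs = [] := by cases xs <;> simp_all
    subst hx; exact fsm_goA_nil
  | succ n ih =>
    intro xs h
    cases xs with
    | nil => exact fsm_goA_nil
    | cons c cs =>
      simp only [List.length_cons] at h
      have hcs : cs.length ≤ n := by omega
      obtain ⟨i1, i2, i3, i4, i5, i6⟩ := ih cs hcs
      refine ⟨?_, ?_, ?_, ?_, ?_, ?_⟩
      · -- NORMAL
        by_cases hq : c = '"'
        · subst hq; simp [fsmB, goA_false_quote, i2]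
        · by_cases hs : c = '/'
          · subst hs; simpa [fsmB] using i3
          · cases cs with
            | nil => simp [fsmB, hq, hs, goA_false_one c hq]
            | cons d ds =>
                have hstep : fsmB (c::d::ds) FsmSt.norm = c :: fsmB (d::ds) FsmSt.norm := by
                  simp [fsmB, hq, hs]
                rw [hstep, i1, goA_false_other c d ds hq (fun hh => hs hh.1) (fun hh => hs hh.1)]
      · -- IN_STRING
        by_cases hb : c = '\\'
        · subst hb
          cases cs with
          | nil => simp [fsmB, goA_true_esc1]
          | cons d ds =>
              have i2' := (ih ds (by simp at hcs; omega)).2.1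
              simp [fsmB, goA_true_esc, i2']
        · by_cases hq : c = '"'
          · subst hq; simp [fsmB, goA_true _ _ hb, i1]
          · simp [fsmB, hb, hq, goA_true _ _ hb, i2]
      · -- SAW_SLASH
        by_cases hs : c = '/'
        · subst hs
          rw [goA_false_lc]
          have : skipLine ('/'::cs) = skipLine cs := by simp [skipLine]
          rw [this]; simpa [fsmB] using i4
        · by_cases hb : c = '*'
          · subst hb; rw [goA_false_bc]; simpa [fsmB] using i5
          · by_cases hq : c = '"'
            · subst hq
              rw [goA_false_other '/' '"' cs (by decide) (fun hh => by exact absurd hh.2 (by decide))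
                  (fun hh => by exact absurd hh.2 (by decide)), goA_false_quote]
              simp [fsmB, i2]
            · rw [goA_false_other '/' c cs (by decide) (fun hh => hs hh.2) (fun hh => hb hh.2)]
              cases cs with
              | nil => simp [fsmB, hs, hb, hq, goA_false_one c hq]
              | cons d ds =>
                  have hstep : fsmB (c::d::ds) FsmSt.slash = '/' :: c :: fsmB (d::ds) FsmSt.norm := by
                    simp [fsmB, hs, hb, hq]
                  rw [hstep, i1, goA_false_other c d ds hq (fun hh => hs hh.1) (fun hh => hs hh.1)]
      · -- LINE_COMMENT
        by_cases hn : c = '\n'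
        · subst hn
          have h1 : skipLine ('\n'::cs) = '\n'::cs := by simp [skipLine]
          rw [h1]
          cases cs with
          | nil => simp [fsmB, goA_false_one '\n' (by decide)]
          | cons d ds =>
              have hstep : fsmB ('\n'::d::ds) FsmSt.line = '\n' :: fsmB (d::ds) FsmSt.norm := by
                simp [fsmB]
              rw [hstep, i1, goA_false_other '\n' d ds (by decide) (fun hh => absurd hh.1 (by decide))
                  (fun hh => absurd hh.1 (by decide))]
        · have h1 : skipLine (c::cs) = skipLine cs := by simp [skipLine, hn]
          rw [h1]; simpa [fsmB, hn] using i4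
      · -- BLOCK_COMMENT
        by_cases hb : c = '*'
        · subst hb; simpa [fsmB] using i6
        · cases cs with
          | nil => simp [fsmB, hb, goB_one]
          | cons d ds =>
              have hstep : fsmB (c::d::ds) FsmSt.block = fsmB (d::ds) FsmSt.block := by
                simp [fsmB, hb]
              rw [hstep, i5, goB_two, if_neg (fun hh => hb hh.1)]
      · -- BLOCK_COMMENT after '*'
        rw [goB_two]
        by_cases hsl : c = '/'
        · subst hsl; simp [fsmB, i1]
        · by_cases hst : c = '*'
          · subst hst; simp [fsmB]
            simpa using i6
          · rw [if_neg (fun hh => hsl hh.2)]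
            cases cs with
            | nil => simp [fsmB, hsl, hst, goB_one]
            | cons d ds =>
                have hstep : fsmB (c::d::ds) FsmSt.star = fsmB (d::ds) FsmSt.block := by
                  simp [fsmB, hsl, hst]
                rw [hstep, i5, goB_two, if_neg (fun hh => hst hh.1)]

-- ===== VERDICT (by name: the statement is the Claim_ definition above) =====
theorem strip_jsonc_comments_spec : Claim_equal_strip_jsonc_comments := by
  intro content _
  unfold Spec_strip_jsonc_comments strip_jsonc_comments strip_jsonc_comments_alt
  exact congrArg String.ofList ((fsm_eq_goA content.toList.length content.toList le_rfl).1).symm
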